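-- pv_equiv track=rewrite | github.com/noeliampgar/ALCP | actividad3-Noelia-PerezGarciaConsuegra.py | es_posible_ganar_con_n_piedras
-- ===== SOURCE A (Python) =====
-- def es_posible_ganar_con_n_piedras(n):
--     tabla=[False]*(n+1)
--     tabla[0]=None
--     tabla[1]=False #no es posible porque el único movimiento es quitar 1 piedra y, por tanto, perder
--     j=2
--     while j<=n:
--         res=False
--         for i in 1,2,6:
--             if(j-i)>0:
--                 res= not tabla[j-i]  #si el siguiente jugador parte de un juego imposible de ganar, éxito
--                 if(res):             #con encontrar una estrategia ganadora sirve, así que salgo del bucle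
--                     break
--         tabla[j]=res                 #actualizo la tabla dinámica para j
--         j+=1
--
--     return tabla[n]
-- ===== SOURCE B (Python) =====
-- def es_posible_ganar_con_n_piedras(n):
--     # Closed form: the losing positions of the {1,2,6}-subtraction game (with
--     # position 1 fixed as lost) are exactly those with n % 7 in {1, 4};
--     # position 0 carries no value (None), as in the table.
--     if n == 0:
--         return None
--     return n % 7 not in (1, 4)
-- ===== Notes on version B (the rewrite author's own statement) =====
-- stated objective: faster
-- what changed: Replaces the O(n) dynamic-programming table over all positions by the closed-form period-7 rule: the position is losing exactly when n % 7 is 1 or 4.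
-- outside the precondition, e.g. on es_posible_ganar_con_n_piedras(0): A raises IndexError, B returns None; on es_posible_ganar_con_n_piedras(-3): A raises IndexError, B returns False
import Mathlib
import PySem

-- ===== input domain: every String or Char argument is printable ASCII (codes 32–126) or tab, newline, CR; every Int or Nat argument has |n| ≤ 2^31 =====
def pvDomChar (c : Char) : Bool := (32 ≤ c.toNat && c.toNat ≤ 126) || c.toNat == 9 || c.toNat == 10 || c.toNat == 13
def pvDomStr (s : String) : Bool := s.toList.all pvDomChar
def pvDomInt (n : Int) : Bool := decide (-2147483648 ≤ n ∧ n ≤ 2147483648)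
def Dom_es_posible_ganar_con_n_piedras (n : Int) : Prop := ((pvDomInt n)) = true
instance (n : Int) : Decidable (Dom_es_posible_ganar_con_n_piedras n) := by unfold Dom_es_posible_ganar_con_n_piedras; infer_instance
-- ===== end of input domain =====

-- B replaces A's O(n) dynamic-programming table by the closed-form period-7 rule
-- (losing iff n % 7 ∈ {1,4}); equivalence is proved on Pre_ (n ≥ 1), exactly where A returns.

-- ===== PORT A =====
-- Python `not x` on a table cell (None or bool)
def pvPyNot (o : Option Bool) : Bool :=
  match o with
  | some b => !b
  | none => true

-- the inner `for i in 1,2,6: ... break` loop; reads tabla[j-i] (always in range when the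
-- while-loop body runs under Pre_, so the `.getD none` default is never taken there)
def pvInnerA (tabla : List (Option Bool)) (j : Int) : List Int → Bool → Bool
  | [], res => res
  | i :: rest, res =>
    if j - i > 0 then
      let res' := pvPyNot ((PySem.List.pyGet? tabla (j - i)).getD none)
      if res' then res' else pvInnerA tabla j rest res'
    else pvInnerA tabla j rest res

-- the `while j<=n` loop, fueled by the number of remaining iterations
def pvLoopA (n : Int) : Nat → Int → List (Option Bool) → List (Option Bool)
  | 0, _, tabla => tabla
  | fuel+1, j, tabla =>
    if j ≤ n then
      pvLoopA n fuel (j + 1)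
        (PySem.List.pySetD tabla j (some (pvInnerA tabla j [1, 2, 6] false)))
    else tabla

def es_posible_ganar_con_n_piedras (n : Int) : Option Bool :=
  let tabla := List.replicate (n + 1).toNat (some false)
  let tabla := PySem.List.pySetD tabla 0 none
  let tabla := PySem.List.pySetD tabla 1 (some false)
  let tabla := pvLoopA n (n - 1).toNat 2 tabla
  (PySem.List.pyGet? tabla n).getD none   -- tabla[n]; in range under Pre_

-- ===== PORT B =====
def es_posible_ganar_con_n_piedras_alt (n : Int) : Option Bool :=
  if n = 0 then none
  else some (!(PySem.Int.mod n 7 == 1 || PySem.Int.mod n 7 == 4))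

-- ===== PRECONDITION & SPEC =====
-- A raises IndexError for every n ≤ 0 (the table has no index 1 then); Pre_ is exactly
-- the set of inputs on which the Python A returns.
def Pre_es_posible_ganar_con_n_piedras (n : Int) : Prop := 1 ≤ n
instance (n : Int) : Decidable (Pre_es_posible_ganar_con_n_piedras n) := by
  unfold Pre_es_posible_ganar_con_n_piedras; infer_instance
def pvWitness_es_posible_ganar_con_n_piedras : Int := (5)

def Spec_es_posible_ganar_con_n_piedras (n : Int) (out : Option Bool) : Prop :=
  out = es_posible_ganar_con_n_piedras_alt n
instance (n : Int) (out : Option Bool) : Decidable (Spec_es_posible_ganar_con_n_piedras n out) := by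
  unfold Spec_es_posible_ganar_con_n_piedras; infer_instance

-- ===== CLAIM (what is proved, stated in full; the proofs are below) =====
def Claim_equal_es_posible_ganar_con_n_piedras : Prop :=
  ∀ (n : Int), Dom_es_posible_ganar_con_n_piedras n →
    Pre_es_posible_ganar_con_n_piedras n →
    Spec_es_posible_ganar_con_n_piedras n (es_posible_ganar_con_n_piedras n)

-- ===== LEMMAS AND PROOFS =====

-- the winning/losing pattern, as a function of the position
def pvPat (k : Nat) : Bool := !(k % 7 == 1 || k % 7 == 4)

-- the table A has computed once positions < j are filled in
def pvGood (j : Nat) : List (Option Bool) :=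
  (List.range j).map (fun k => if k = 0 then none else some (pvPat k))

theorem pvGood_length (j : Nat) : (pvGood j).length = j := by
  simp [pvGood]

theorem pvGood_getElem? (j k : Nat) (hk : k < j) :
    (pvGood j)[k]? = some (if k = 0 then none else some (pvPat k)) := by
  simp [pvGood, hk]

theorem pvGood_succ (j : Nat) (hj : 1 ≤ j) :
    pvGood (j + 1) = pvGood j ++ [some (pvPat j)] := by
  simp [pvGood, List.range_succ]
  omega

theorem pvRead (j i : Nat) (rest : List (Option Bool)) (h1 : 1 ≤ i) (hij : i < j) :
    (PySem.List.pyGet? (pvGood j ++ rest) ((j : Int) - (i : Int))).getD none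
      = some (pvPat (j - i)) := by
  have hcast : (j : Int) - (i : Int) = ((j - i : Nat) : Int) := by omega
  rw [hcast, PySem.List.pyGet?_natCast, List.getElem?_append_left (by simpa [pvGood_length] using (by omega : j - i < j))]
  rw [pvGood_getElem? j (j - i) (by omega)]
  simp [show ¬ (j - i = 0) by omega]

theorem pvPatRec (j : Nat) (hj : 7 ≤ j) :
    pvPat j = (!pvPat (j - 1) || !pvPat (j - 2) || !pvPat (j - 6)) := by
  have h7 : j % 7 < 7 := Nat.mod_lt _ (by norm_num)
  interval_cases h : j % 7 <;>
    · have e1 : (j - 1) % 7 = (j % 7 + 6) % 7 := by omega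
      have e2 : (j - 2) % 7 = (j % 7 + 5) % 7 := by omega
      have e6 : (j - 6) % 7 = (j % 7 + 1) % 7 := by omega
      simp [pvPat, e1, e2, e6, h]

theorem pvPatMid (j : Nat) (h3 : 3 ≤ j) (h6 : j ≤ 6) :
    pvPat j = (!pvPat (j - 1) || !pvPat (j - 2)) := by
  interval_cases j <;> decide

theorem pvSetAppendCons {α : Type} (l1 l2 : List α) (x v : α) :
    (l1 ++ x :: l2).set l1.length v = l1 ++ v :: l2 := by
  induction l1 with
  | nil => rfl
  | cons h t ih => simp [ih]

theorem pvInner_eval (j : Nat) (h2 : 2 ≤ j) (rest : List (Option Bool)) :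
    pvInnerA (pvGood j ++ rest) (j : Int) [1, 2, 6] false = pvPat j := by
  have r1 := pvRead j 1 rest (by omega) (by omega)
  push_cast at r1
  simp only [pvInnerA]
  rw [if_pos (by omega : (j : Int) - 1 > 0), r1]
  by_cases h7 : 7 ≤ j
  · have r2 := pvRead j 2 rest (by omega) (by omega)
    have r6 := pvRead j 6 rest (by omega) (by omega)
    push_cast at r2 r6
    have c2 : ((j : Int) - 2 > 0) := by omega
    have c6 : ((j : Int) - 6 > 0) := by omega
    simp only [if_pos c2, if_pos c6, r2, r6]
    rw [pvPatRec j h7]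
    cases pvPat (j - 1) <;> cases pvPat (j - 2) <;> cases pvPat (j - 6) <;> simp [pvPyNot]
  · by_cases hj2 : j = 2
    · subst hj2
      norm_num [pvPyNot]
      decide
    · have h3 : 3 ≤ j := by omega
      have r2 := pvRead j 2 rest (by omega) (by omega)
      push_cast at r2
      have c2 : ((j : Int) - 2 > 0) := by omega
      have c6 : ¬ ((j : Int) - 6 > 0) := by omega
      simp only [if_pos c2, if_neg c6, r2]
      rw [pvPatMid j h3 (by omega)]
      cases pvPat (j - 1) <;> cases pvPat (j - 2) <;> simp [pvPyNot]

theorem pvLoop_inv (fuel : Nat) : ∀ (j : Nat), 2 ≤ j →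
    pvLoopA ((j + fuel - 1 : Nat) : Int) fuel (j : Int)
        (pvGood j ++ List.replicate fuel (some false))
      = pvGood (j + fuel) := by
  induction fuel with
  | zero => intro j hj; simp [pvLoopA]
  | succ fuel ih =>
    intro j hj
    simp only [pvLoopA]
    rw [if_pos (by omega : (j : Int) ≤ ((j + (fuel + 1) - 1 : Nat) : Int))]
    rw [pvInner_eval j hj _]
    rw [show List.replicate (fuel + 1) (some false) = some false :: List.replicate fuel (some false) from rfl]
    rw [PySem.List.pySetD_natCast]
    rw [show (pvGood j ++ some false :: List.replicate fuel (some false)).set j (some (pvPat j))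
          = pvGood (j + 1) ++ List.replicate fuel (some false) by
        have h := pvSetAppendCons (pvGood j) (List.replicate fuel (some false)) (some false)
          (some (pvPat j))
        rw [pvGood_length] at h
        rw [h, pvGood_succ j (by omega), List.append_assoc]
        rfl]
    have := ih (j + 1) (by omega)
    rw [show (j : Int) + 1 = ((j + 1 : Nat) : Int) by push_cast; ring]
    rw [show ((j + (fuel + 1) - 1 : Nat) : Int) = (((j + 1) + fuel - 1 : Nat) : Int) by omega]
    rw [this]
    congr 1
    omega

-- ===== VERDICT (by name: the statement is the Claim_ definition above) =====
theorem es_posible_ganar_con_n_piedras_spec : Claim_equal_es_posible_ganar_con_n_piedras := by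
  intro n _ hpre
  unfold Spec_es_posible_ganar_con_n_piedras
  obtain ⟨m, rfl⟩ : ∃ m : Nat, n = (m : Int) := ⟨n.toNat, by
    have : (1:Int) ≤ n := hpre
    omega⟩
  have hm : 1 ≤ m := by
    have h1 : (1:Int) ≤ (m:Int) := hpre
    omega
  unfold es_posible_ganar_con_n_piedras
  dsimp only
  have hrep : List.replicate ((m : Int) + 1).toNat ((some false : Option Bool))
      = some false :: some false :: List.replicate (m - 1) (some false) := by
    rw [show ((m : Int) + 1).toNat = 1 + (1 + (m - 1)) by omega]
    simp [List.replicate_add]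
  rw [hrep]
  have hinit : PySem.List.pySetD (PySem.List.pySetD
        (some false :: some false :: List.replicate (m - 1) (some false)) 0 none) 1 (some false)
      = pvGood 2 ++ List.replicate (m - 1) (some false) := by
    rw [show ((0 : Int)) = ((0 : Nat) : Int) by norm_num, PySem.List.pySetD_natCast]
    rw [show ((1 : Int)) = ((1 : Nat) : Int) by norm_num, PySem.List.pySetD_natCast]
    rfl
  rw [hinit]
  have hfuel : ((m : Int) - 1).toNat = m - 1 := by omega
  rw [hfuel]
  have hloop := pvLoop_inv (m - 1) 2 (by omega)
  rw [show ((2 : Int)) = ((2 : Nat) : Int) by norm_num,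
      show (m : Int) = ((2 + (m - 1) - 1 : Nat) : Int) by omega] at *
  rw [hloop]
  rw [show (2 + (m - 1) : Nat) = m + 1 by omega]
  rw [show (m + 1 - 1 : Nat) = m by omega]
  rw [PySem.List.pyGet?_natCast, pvGood_getElem? (m + 1) m (by omega)]
  rw [if_neg (show ¬ m = 0 by omega)]
  unfold es_posible_ganar_con_n_piedras_alt
  rw [if_neg (by omega : ¬ ((m : Nat) : Int) = 0)]
  rw [show (7 : Int) = ((7 : Nat) : Int) by norm_num, PySem.Int.mod_natCast]
  have h7 : m % 7 < 7 := Nat.mod_lt _ (by norm_num)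
  interval_cases h : m % 7 <;> simp [pvPat, h]
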